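-- pv_equiv track=rewrite | github.com/evmts/agent | agent/tools/patch.py | seek_sequence
-- ===== SOURCE A (Python) =====
-- from typing import List, Optional, Tuple
--
-- def seek_sequence(lines: List[str], pattern: List[str], start_index: int) -> int:
--     """Find the first occurrence of a pattern in lines starting from start_index.
--
--     Tries exact match first, then trimmed match for flexibility.
--
--     Args:
--         lines: Lines to search in
--         pattern: Pattern to find
--         start_index: Index to start searching from
--
--     Returns:
--         Index of first match, or -1 if not found
--     """
--     if not pattern:
--         return -1
--
--     # Try exact match first
--     for i in range(start_index, len(lines) - len(pattern) + 1):
--         matches = True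
--         for j in range(len(pattern)):
--             if lines[i + j] != pattern[j]:
--                 matches = False
--                 break
--         if matches:
--             return i
--
--     # If exact match fails, try trimmed match (more flexible)
--     for i in range(start_index, len(lines) - len(pattern) + 1):
--         matches = True
--         for j in range(len(pattern)):
--             if lines[i + j].strip() != pattern[j].strip():
--                 matches = False
--                 break
--         if matches:
--             return i
--
--     return -1
-- ===== SOURCE B (Python) =====
-- def seek_sequence(lines, pattern, start_index):
--     """Single pass: compare whole line windows by slice; strip every line once
--     up front; remember the first trimmed match while scanning for an exact one."""
--     if not pattern:
--         return -1
--     n, m = len(lines), len(pattern)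
--     stripped_lines = [l.strip() for l in lines]
--     stripped_pattern = [p.strip() for p in pattern]
--     first_trimmed = -1
--     for i in range(start_index, n - m + 1):
--         if lines[i:i + m] == pattern:
--             return i
--         if first_trimmed < 0 and stripped_lines[i:i + m] == stripped_pattern:
--             first_trimmed = i
--     return first_trimmed
-- ===== Notes on version B (the rewrite author's own statement) =====
-- stated objective: alternative
-- what changed: Replaces A's two full scans with hand-written inner character-by-line loops (re-stripping every line on each window in pass two) by a single pass that strips all lines once up front, compares windows by list slicing, and records the first trimmed match while searching for an exact one.
-- outside the precondition, e.g. on seek_sequence(['a', 'b'], ['b'], -2): A returns -1, B returns 1; on seek_sequence(['a'], ['a'], -5): A raises IndexError, B returns 0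
import Mathlib
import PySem

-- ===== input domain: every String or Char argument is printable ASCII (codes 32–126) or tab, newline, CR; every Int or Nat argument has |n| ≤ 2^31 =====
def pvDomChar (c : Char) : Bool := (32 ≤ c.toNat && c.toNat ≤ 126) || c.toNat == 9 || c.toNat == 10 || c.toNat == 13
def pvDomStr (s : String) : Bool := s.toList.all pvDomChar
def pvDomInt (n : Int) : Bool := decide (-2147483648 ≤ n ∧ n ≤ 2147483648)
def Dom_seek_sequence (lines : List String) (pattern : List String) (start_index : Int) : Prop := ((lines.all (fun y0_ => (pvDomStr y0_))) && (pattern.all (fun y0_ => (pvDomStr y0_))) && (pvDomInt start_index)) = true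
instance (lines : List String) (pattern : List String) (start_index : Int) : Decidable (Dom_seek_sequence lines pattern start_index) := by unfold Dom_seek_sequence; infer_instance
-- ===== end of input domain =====

-- B restructures the search: one pass with every line stripped once up front and
-- whole-window slice comparison, instead of A's two scans with index-by-index inner loops.

-- ===== PORT A =====
-- optional trimming used by A's two passes (pass 1: t = false, pass 2: t = true)
def pvStripIf (t : Bool) (s : String) : String := if t then PySem.Str.strip s else s

-- inner loop 'for j in range(len(pattern)): if f(lines[i+j]) != f(pattern[j]): …' ;
-- recursion on the remaining pattern, j the current index; pyGet? none = IndexError (outside Pre_)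
def pvA_inner (lines : List String) (t : Bool) (i : Int) : Int → List String → Bool
  | _, [] => true
  | j, p :: ps =>
    match PySem.List.pyGet? lines (i + j) with
    | some a => if pvStripIf t a ≠ pvStripIf t p then false else pvA_inner lines t i (j + 1) ps
    | none => false

-- outer loop 'for i in range(start, n-m+1): … if matches: return i'
def pvA_outer (lines pattern : List String) (t : Bool) : List Int → Option Int
  | [] => none
  | i :: is => if pvA_inner lines t i 0 pattern then some i else pvA_outer lines pattern t is

def seek_sequence (lines : List String) (pattern : List String) (start_index : Int) : Int :=
  if pattern.isEmpty then -1
  else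
    let r := PySem.List.pyRange start_index ((lines.length : Int) - (pattern.length : Int) + 1) 1
    match pvA_outer lines pattern false r with
    | some i => i
    | none =>
      match pvA_outer lines pattern true r with
      | some i => i
      | none => -1

-- ===== PORT B =====
-- Source B's single loop: return i on an exact slice match, remember the first trimmed one
def pvB_loop (lines sl pattern sp : List String) (m : Int) : Int → List Int → Int
  | ft, [] => ft
  | ft, i :: is =>
    if PySem.List.slice lines (some i) (some (i + m)) = pattern then i
    else
      pvB_loop lines sl pattern sp m
        (if ft < 0 ∧ PySem.List.slice sl (some i) (some (i + m)) = sp then i else ft) is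

def seek_sequence_alt (lines : List String) (pattern : List String) (start_index : Int) : Int :=
  if pattern.isEmpty then -1
  else
    let n : Int := lines.length
    let m : Int := pattern.length
    let sl := lines.map PySem.Str.strip
    let sp := pattern.map PySem.Str.strip
    pvB_loop lines sl pattern sp m (-1) (PySem.List.pyRange start_index (n - m + 1) 1)

-- ===== PRECONDITION & SPEC =====
-- Pre_ excludes negative start_index, on which Python's negative-index wraparound makes A
-- raise IndexError for start_index < -len(lines) and otherwise match at negative positions
-- (it can return -1 as a match position, indistinguishable from 'not found') — an accidental
-- corner for a parameter documented as an index to start searching from.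
def Pre_seek_sequence (lines : List String) (pattern : List String) (start_index : Int) : Prop :=
  0 ≤ start_index
instance (lines : List String) (pattern : List String) (start_index : Int) : Decidable (Pre_seek_sequence lines pattern start_index) := by unfold Pre_seek_sequence; infer_instance

def pvWitness_seek_sequence : List String × List String × Int := (["a", "b"], ["b"], 0)

def Spec_seek_sequence (lines : List String) (pattern : List String) (start_index : Int) (out : Int) : Prop := out = seek_sequence_alt lines pattern start_index
instance (lines : List String) (pattern : List String) (start_index : Int) (out : Int) : Decidable (Spec_seek_sequence lines pattern start_index out) := by unfold Spec_seek_sequence; infer_instance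

-- ===== CLAIM (what is proved, stated in full; the proofs are below) =====
def Claim_equal_seek_sequence : Prop := ∀ (lines : List String) (pattern : List String) (start_index : Int), Dom_seek_sequence lines pattern start_index → Pre_seek_sequence lines pattern start_index → Spec_seek_sequence lines pattern start_index (seek_sequence lines pattern start_index)


-- ===== LEMMAS AND PROOFS =====

-- A's inner loop on a window inside the list is a window comparison (through the optional trim)
lemma pvA_inner_eq (lines : List String) (t : Bool) :
    ∀ (ps : List String) (i j : Int), 0 ≤ i + j →
      (i + j).toNat + ps.length ≤ lines.length →
      pvA_inner lines t i j ps =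
        decide ((((lines.map (pvStripIf t)).drop (i + j).toNat).take ps.length)
                  = ps.map (pvStripIf t)) := by
  intro ps
  induction ps with
  | nil =>
    intro i j h0 hb
    rw [show pvA_inner lines t i j [] = true from rfl]
    simp
  | cons p ps ih =>
    intro i j h0 hb
    have hb' : (i + j).toNat + (ps.length + 1) ≤ lines.length := by simpa using hb
    have hlt : (i + j).toNat < lines.length := by omega
    have hltI : i + j < (lines.length : Int) := by omega
    rw [pvA_inner, PySem.List.pyGet?_eq_some_getElem lines h0 hltI]
    dsimp only
    have hmlt : (i + j).toNat < (lines.map (pvStripIf t)).length := by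
      simpa using hlt
    have hdrop : (lines.map (pvStripIf t)).drop (i + j).toNat =
        ((lines.map (pvStripIf t))[(i + j).toNat]'hmlt) :: (lines.map (pvStripIf t)).drop ((i + j).toNat + 1) :=
      List.drop_eq_getElem_cons hmlt
    have hstep : i + (j + 1) = (i + j) + 1 := by ring
    by_cases heq : pvStripIf t lines[(i + j).toNat] = pvStripIf t p
    · rw [if_neg (by simp [heq]), ih i (j + 1) (by omega) (by rw [hstep]; omega)]
      rw [hdrop]
      simp [List.getElem_map, heq, hstep]
      rw [show (i + j + 1).toNat = (i + j).toNat + 1 from by omega]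
    · rw [if_pos (by simpa using heq), hdrop]
      simp [List.getElem_map, heq]
lemma pv_window_take (lines : List String) (i m : Int) (h0 : 0 ≤ i) (hm : 0 ≤ m) :
    PySem.List.slice lines (some i) (some (i + m)) = (lines.drop i.toNat).take m.toNat := by
  rw [PySem.List.slice_toNat _ h0 (by omega)]
  congr 1
  omega

-- the single B loop computes exact-pass-then-trimmed-pass over the same index range
lemma pv_loop_eq (lines pattern : List String) (fuel : Nat) :
    ∀ (s ft : Int), 0 ≤ s →
      (((lines.length : Int) - (pattern.length : Int) + 1) - s).toNat = fuel →
      pvB_loop lines (lines.map PySem.Str.strip) pattern (pattern.map PySem.Str.strip)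
          (pattern.length) ft
          (PySem.List.pyRange s ((lines.length : Int) - (pattern.length : Int) + 1) 1) =
        (match pvA_outer lines pattern false
            (PySem.List.pyRange s ((lines.length : Int) - (pattern.length : Int) + 1) 1) with
         | some i => i
         | none =>
           match (if ft < 0 then pvA_outer lines pattern true
              (PySem.List.pyRange s ((lines.length : Int) - (pattern.length : Int) + 1) 1) else none) with
           | some i => i
           | none => ft) := by
  induction fuel with
  | zero =>
    intro s ft hs hf
    rw [PySem.List.pyRange_one_eq_nil (by omega)]
    cases hlt : decide (ft < 0) <;> simp_all [pvB_loop, pvA_outer]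
  | succ fuel ih =>
    intro s ft hs hf
    have hse : s < (lines.length : Int) - (pattern.length : Int) + 1 := by omega
    rw [PySem.List.pyRange_one_cons hse]
    have hb : s.toNat + pattern.length ≤ lines.length := by omega
    have hex := pvA_inner_eq lines false pattern s 0 (by omega) (by simpa using hb)
    have htr := pvA_inner_eq lines true pattern s 0 (by omega) (by simpa using hb)
    have hid : ∀ (l : List String), l.map (pvStripIf false) = l := by
      intro l; rw [show pvStripIf false = (id : String → String) from rfl, List.map_id]
    have hmapeq : ∀ (l : List String), l.map (pvStripIf true) = l.map PySem.Str.strip := by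
      intro l; rw [show pvStripIf true = PySem.Str.strip from rfl]
    simp only [hid] at hex
    simp only [hmapeq] at htr
    simp only [add_zero] at hex htr
    have hwinE := pv_window_take lines s (pattern.length) hs (by positivity)
    have hwinT := pv_window_take (lines.map PySem.Str.strip) s (pattern.length) hs (by positivity)
    simp only [Int.toNat_natCast] at hwinE hwinT
    have hns : ¬ s < 0 := by omega
    by_cases hexact : List.take pattern.length (List.drop s.toNat lines) = pattern
    · have hexB : pvA_inner lines false s 0 pattern = true := by
        rw [hex]; exact decide_eq_true hexact
      rw [pvB_loop, if_pos (by rw [hwinE]; exact hexact)]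
      simp [pvA_outer, hexB]
    · have hexB : pvA_inner lines false s 0 pattern = false := by
        rw [hex]; exact decide_eq_false hexact
      by_cases htrm : List.take pattern.length (List.drop s.toNat (List.map PySem.Str.strip lines))
          = List.map PySem.Str.strip pattern
      · have htrB : pvA_inner lines true s 0 pattern = true := by
          rw [htr]; exact decide_eq_true htrm
        by_cases hft : ft < 0
        · have hupd : (if ft < 0 ∧ PySem.List.slice (List.map PySem.Str.strip lines) (some s)
              (some (s + (pattern.length : Int))) = List.map PySem.Str.strip pattern
              then s else ft) = s := if_pos ⟨hft, by rw [hwinT]; exact htrm⟩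
          rw [pvB_loop, if_neg (by rw [hwinE]; exact hexact), hupd,
            ih (s + 1) s (by omega) (by omega)]
          simp [pvA_outer, hexB, htrB, hft, hns]
        · have hupd : (if ft < 0 ∧ PySem.List.slice (List.map PySem.Str.strip lines) (some s)
              (some (s + (pattern.length : Int))) = List.map PySem.Str.strip pattern
              then s else ft) = ft := if_neg (by tauto)
          rw [pvB_loop, if_neg (by rw [hwinE]; exact hexact), hupd,
            ih (s + 1) ft (by omega) (by omega)]
          simp [pvA_outer, hexB, hft]
      · have htrB : pvA_inner lines true s 0 pattern = false := by
          rw [htr]; exact decide_eq_false htrm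
        have hupd : (if ft < 0 ∧ PySem.List.slice (List.map PySem.Str.strip lines) (some s)
            (some (s + (pattern.length : Int))) = List.map PySem.Str.strip pattern
            then s else ft) = ft := if_neg (by rw [hwinT]; tauto)
        rw [pvB_loop, if_neg (by rw [hwinE]; exact hexact), hupd,
          ih (s + 1) ft (by omega) (by omega)]
        by_cases hft : ft < 0
        · simp [pvA_outer, hexB, htrB, hft]
        · simp [pvA_outer, hexB, hft]

-- ===== VERDICT (by name: the statement is the Claim_ definition above) =====
theorem seek_sequence_spec : Claim_equal_seek_sequence := by
  intro lines pattern start_index _hdom hpre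
  unfold Spec_seek_sequence seek_sequence seek_sequence_alt
  by_cases hp : pattern.isEmpty
  · simp [hp]
  · rw [if_neg hp, if_neg hp]
    rw [pv_loop_eq lines pattern
      ((((lines.length : Int) - (pattern.length : Int) + 1) - start_index).toNat)
      start_index (-1) hpre rfl]
    rw [if_pos (show (-1 : Int) < 0 by norm_num)]
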